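-- pv_equiv track=rewrite | github.com/caterer-z-t/GRiD | playground/cram_crai/src/realign_lpa.py | classify_variant
-- ===== SOURCE A (Python) =====
-- BAD_SCORE = 9999
--
-- def classify_variant(combined_scores):
--     """
--     Classify variant based on combined scores from read pair.
--
--     Returns: '1B_KIV3', '1B_KIV2', '1B_tied', or '1A'
--     """
--     s = combined_scores
--
--     # Check if position 0 (first repeat) has minimum score -> 1B_KIV3
--     if all(s[0] < s[i] for i in range(1, 7)):
--         return '1B_KIV3'
--
--     # Check if position 4 (fifth repeat) has minimum score -> 1B_KIV2
--     elif all(s[4] < s[i] for i in range(7) if i != 4):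
--         return '1B_KIV2'
--
--     # Check if positions 0 and 4 are tied for minimum -> 1B_tied
--     elif s[4] == s[0] and all(s[4] < s[i] for i in range(1, 7) if i != 4):
--         return '1B_tied'
--
--     # Otherwise check for 1A (another position has minimum)
--     else:
--         min_1A = BAD_SCORE
--         for rep in range(1, 7):
--             if rep != 4:
--                 min_1A = min(min_1A, s[rep])
--
--         if min_1A < s[0] and min_1A < s[4]:
--             return '1A'
--
--     return None  # Ambiguous classification
-- ===== SOURCE B (Python) =====
-- BAD_SCORE = 9999
--
-- def classify_variant(combined_scores):
--     """
--     Classify variant based on combined scores from read pair.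
--
--     Returns: '1B_KIV3', '1B_KIV2', '1B_tied', '1A', or None.
--     """
--     head = [combined_scores[i] for i in range(7)]
--     a, b = head[0], head[4]
--     M = min(head)
--     k = head.count(M)
--     if k == 1 and a == M:
--         return '1B_KIV3'
--     if k == 1 and b == M:
--         return '1B_KIV2'
--     if k == 2 and a == M and b == M:
--         return '1B_tied'
--     m = min([BAD_SCORE] + head[1:4] + head[5:7])
--     if m < a and m < b:
--         return '1A'
--     return None
-- ===== Notes on version B (the rewrite author's own statement) =====
-- stated objective: alternative
-- what changed: B classifies from the global minimum of all seven scores and its multiplicity (min + count, then a capped second minimum for the 1A test), instead of A's three generator-based all() scans over index ranges plus an accumulator loop.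
import Mathlib
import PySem

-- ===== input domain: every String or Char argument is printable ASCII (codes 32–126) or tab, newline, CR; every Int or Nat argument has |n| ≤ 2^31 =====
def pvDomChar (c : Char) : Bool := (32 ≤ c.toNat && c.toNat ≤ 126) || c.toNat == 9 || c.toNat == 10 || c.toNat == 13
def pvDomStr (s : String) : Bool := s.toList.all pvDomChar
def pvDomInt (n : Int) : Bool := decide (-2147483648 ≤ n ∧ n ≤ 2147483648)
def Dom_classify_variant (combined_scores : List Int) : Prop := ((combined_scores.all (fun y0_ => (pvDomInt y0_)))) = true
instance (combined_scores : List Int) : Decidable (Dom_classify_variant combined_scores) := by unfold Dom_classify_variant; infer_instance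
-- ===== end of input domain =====

-- B classifies from the global minimum and its multiplicity (min + count + capped second min)
-- instead of A's three per-position all() scans and accumulator loop (objective: alternative).


-- Python list indexing xs[i]; Pre_ (length at least seven) keeps every access of either port
-- in range, so the .getD default is never reached on admitted inputs (Python raises IndexError there).
def pvGet (s : List Int) (i : Int) : Int := (PySem.List.pyGet? s i).getD 0

-- ===== PORT A =====
def classify_variant (combined_scores : List Int) : Option String :=
  let s := combined_scores
  if (PySem.List.pyRange 1 7 1).all (fun i => decide (pvGet s 0 < pvGet s i)) then
    some "1B_KIV3"
  else if ((PySem.List.pyRange 0 7 1).filter (fun i => i ≠ 4)).all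
      (fun i => decide (pvGet s 4 < pvGet s i)) then
    some "1B_KIV2"
  else if pvGet s 4 = pvGet s 0 ∧ ((PySem.List.pyRange 1 7 1).filter (fun i => i ≠ 4)).all
      (fun i => decide (pvGet s 4 < pvGet s i)) = true then
    some "1B_tied"
  else
    let min_1A := (PySem.List.pyRange 1 7 1).foldl
      (fun m rep => if rep ≠ 4 then min m (pvGet s rep) else m) 9999
    if min_1A < pvGet s 0 ∧ min_1A < pvGet s 4 then some "1A" else none

-- ===== PORT B =====
def classify_variant_alt (combined_scores : List Int) : Option String :=
  let head := (PySem.List.pyRange 0 7 1).map (fun i => pvGet combined_scores i)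
  let a := pvGet head 0
  let b := pvGet head 4
  let M := (PySem.List.min? head (fun x => x)).getD 0
  let k := (head.count M : Int)
  if k = 1 ∧ a = M then some "1B_KIV3"
  else if k = 1 ∧ b = M then some "1B_KIV2"
  else if k = 2 ∧ a = M ∧ b = M then some "1B_tied"
  else
    let m := (PySem.List.min? ((9999 : Int) ::
        (PySem.List.slice head (some 1) (some 4) ++ PySem.List.slice head (some 5) (some 7)))
        (fun x => x)).getD 0
    if m < a ∧ m < b then some "1A" else none

-- ===== PRECONDITION & SPEC =====
-- A indexes positions zero through six; on lists shorter than seven it raises IndexError, so those inputs are excluded.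
def Pre_classify_variant (combined_scores : List Int) : Prop := 7 ≤ combined_scores.length
instance (combined_scores : List Int) : Decidable (Pre_classify_variant combined_scores) := by
  unfold Pre_classify_variant; infer_instance
def pvWitness_classify_variant : List Int := [3, 1, 2, 5, 4, 6, 7]

def Spec_classify_variant (combined_scores : List Int) (out : Option String) : Prop :=
  out = classify_variant_alt combined_scores
instance (combined_scores : List Int) (out : Option String) : Decidable (Spec_classify_variant combined_scores out) := by
  unfold Spec_classify_variant; infer_instance

-- ===== CLAIM (what is proved, stated in full; the proofs are below) =====
def Claim_equal_classify_variant : Prop := ∀ (combined_scores : List Int), Dom_classify_variant combined_scores → Pre_classify_variant combined_scores → Spec_classify_variant combined_scores (classify_variant combined_scores)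

-- ===== LEMMAS AND PROOFS =====

-- the three branch tests of B (count of the global minimum plus a membership equality),
-- characterised as A's pairwise strict-inequality tests
set_option maxHeartbeats 2000000 in
theorem pv_count_iffs (x0 x1 x2 x3 x4 x5 x6 M : Int)
    (hM : M = min x0 (min x1 (min x2 (min x3 (min x4 (min x5 x6)))))) :
    ((((if x6 = M then (1:Int) else 0) + (if x5 = M then 1 else 0) + (if x4 = M then 1 else 0) + (if x3 = M then 1 else 0) + (if x2 = M then 1 else 0) + (if x1 = M then 1 else 0) + (if x0 ≤ x1 ∧ x0 ≤ x2 ∧ x0 ≤ x3 ∧ x0 ≤ x4 ∧ x0 ≤ x5 ∧ x0 ≤ x6 then 1 else 0)) = 1 ∧ x0 ≤ x1 ∧ x0 ≤ x2 ∧ x0 ≤ x3 ∧ x0 ≤ x4 ∧ x0 ≤ x5 ∧ x0 ≤ x6) ↔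
      (x0 < x1 ∧ x0 < x2 ∧ x0 < x3 ∧ x0 < x4 ∧ x0 < x5 ∧ x0 < x6)) ∧
    ((((if x6 = M then (1:Int) else 0) + (if x5 = M then 1 else 0) + (if x4 = M then 1 else 0) + (if x3 = M then 1 else 0) + (if x2 = M then 1 else 0) + (if x1 = M then 1 else 0) + (if x0 ≤ x1 ∧ x0 ≤ x2 ∧ x0 ≤ x3 ∧ x0 ≤ x4 ∧ x0 ≤ x5 ∧ x0 ≤ x6 then 1 else 0)) = 1 ∧ x4 = M) ↔
      (x4 < x0 ∧ x4 < x1 ∧ x4 < x2 ∧ x4 < x3 ∧ x4 < x5 ∧ x4 < x6)) ∧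
    ((((if x6 = M then (1:Int) else 0) + (if x5 = M then 1 else 0) + (if x4 = M then 1 else 0) + (if x3 = M then 1 else 0) + (if x2 = M then 1 else 0) + (if x1 = M then 1 else 0) + (if x0 ≤ x1 ∧ x0 ≤ x2 ∧ x0 ≤ x3 ∧ x0 ≤ x4 ∧ x0 ≤ x5 ∧ x0 ≤ x6 then 1 else 0)) = 2 ∧ (x0 ≤ x1 ∧ x0 ≤ x2 ∧ x0 ≤ x3 ∧ x0 ≤ x4 ∧ x0 ≤ x5 ∧ x0 ≤ x6) ∧ x4 = M) ↔
      (x4 = x0 ∧ x4 < x1 ∧ x4 < x2 ∧ x4 < x3 ∧ x4 < x5 ∧ x4 < x6)) := by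
  generalize hg6 : (if x6 = M then (1:Int) else 0) = t6
  generalize hg5 : (if x5 = M then (1:Int) else 0) = t5
  generalize hg4 : (if x4 = M then (1:Int) else 0) = t4
  generalize hg3 : (if x3 = M then (1:Int) else 0) = t3
  generalize hg2 : (if x2 = M then (1:Int) else 0) = t2
  generalize hg1 : (if x1 = M then (1:Int) else 0) = t1
  generalize hg0 : (if x0 ≤ x1 ∧ x0 ≤ x2 ∧ x0 ≤ x3 ∧ x0 ≤ x4 ∧ x0 ≤ x5 ∧ x0 ≤ x6 then (1:Int) else 0) = t0
  have c6 : t6 = 1 ∧ x6 = M ∨ t6 = 0 ∧ ¬x6 = M := by rw [← hg6]; split_ifs with h <;> simp [h]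
  have c5 : t5 = 1 ∧ x5 = M ∨ t5 = 0 ∧ ¬x5 = M := by rw [← hg5]; split_ifs with h <;> simp [h]
  have c4 : t4 = 1 ∧ x4 = M ∨ t4 = 0 ∧ ¬x4 = M := by rw [← hg4]; split_ifs with h <;> simp [h]
  have c3 : t3 = 1 ∧ x3 = M ∨ t3 = 0 ∧ ¬x3 = M := by rw [← hg3]; split_ifs with h <;> simp [h]
  have c2 : t2 = 1 ∧ x2 = M ∨ t2 = 0 ∧ ¬x2 = M := by rw [← hg2]; split_ifs with h <;> simp [h]
  have c1 : t1 = 1 ∧ x1 = M ∨ t1 = 0 ∧ ¬x1 = M := by rw [← hg1]; split_ifs with h <;> simp [h]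
  have c0 : t0 = 1 ∧ (x0 ≤ x1 ∧ x0 ≤ x2 ∧ x0 ≤ x3 ∧ x0 ≤ x4 ∧ x0 ≤ x5 ∧ x0 ≤ x6) ∨
      t0 = 0 ∧ ¬(x0 ≤ x1 ∧ x0 ≤ x2 ∧ x0 ≤ x3 ∧ x0 ≤ x4 ∧ x0 ≤ x5 ∧ x0 ≤ x6) := by
    rw [← hg0]; split_ifs with h <;> simp [h]
  have hb0 : M ≤ x0 := by simp [hM]
  have hb1 : M ≤ x1 := by simp [hM]
  have hb2 : M ≤ x2 := by simp [hM]
  have hb3 : M ≤ x3 := by simp [hM]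
  have hb4 : M ≤ x4 := by simp [hM]
  have hb5 : M ≤ x5 := by simp [hM]
  have hb6 : M ≤ x6 := by simp [hM]
  have hat : M = x0 ∨ M = x1 ∨ M = x2 ∨ M = x3 ∨ M = x4 ∨ M = x5 ∨ M = x6 := by
    rcases min_choice x0 (min x1 (min x2 (min x3 (min x4 (min x5 x6))))) with h | h
    · exact Or.inl (hM.trans h)
    rcases min_choice x1 (min x2 (min x3 (min x4 (min x5 x6)))) with h' | h'
    · exact Or.inr (Or.inl (hM.trans (h.trans h')))
    rcases min_choice x2 (min x3 (min x4 (min x5 x6))) with h'' | h''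
    · exact Or.inr (Or.inr (Or.inl (hM.trans ((h.trans h').trans h''))))
    rcases min_choice x3 (min x4 (min x5 x6)) with h3 | h3
    · exact Or.inr (Or.inr (Or.inr (Or.inl (hM.trans (((h.trans h').trans h'').trans h3)))))
    rcases min_choice x4 (min x5 x6) with h4 | h4
    · exact Or.inr (Or.inr (Or.inr (Or.inr (Or.inl
        (hM.trans ((((h.trans h').trans h'').trans h3).trans h4))))))
    rcases min_choice x5 x6 with h5 | h5
    · exact Or.inr (Or.inr (Or.inr (Or.inr (Or.inr (Or.inl
        (hM.trans (((((h.trans h').trans h'').trans h3).trans h4).trans h5)))))))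
    · exact Or.inr (Or.inr (Or.inr (Or.inr (Or.inr (Or.inr
        (hM.trans (((((h.trans h').trans h'').trans h3).trans h4).trans h5)))))))
  clear hM hg0 hg1 hg2 hg3 hg4 hg5 hg6
  rcases c6 with ⟨rfl, h6⟩ | ⟨rfl, h6⟩ <;> rcases c5 with ⟨rfl, h5⟩ | ⟨rfl, h5⟩ <;>
    rcases c4 with ⟨rfl, h4⟩ | ⟨rfl, h4⟩ <;> rcases c3 with ⟨rfl, h3⟩ | ⟨rfl, h3⟩ <;>
    rcases c2 with ⟨rfl, h2⟩ | ⟨rfl, h2⟩ <;> rcases c1 with ⟨rfl, h1⟩ | ⟨rfl, h1⟩ <;>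
    rcases c0 with ⟨rfl, h0⟩ | ⟨rfl, h0⟩ <;> omega

-- ===== VERDICT (by name: the statement is the Claim_ definition above) =====
set_option maxHeartbeats 1000000 in
theorem classify_variant_spec : Claim_equal_classify_variant := by
  intro s _hdom hpre
  unfold Pre_classify_variant at hpre
  obtain ⟨x0, x1, x2, x3, x4, x5, x6, rest, rfl⟩ :
      ∃ x0 x1 x2 x3 x4 x5 x6 rest, s = x0 :: x1 :: x2 :: x3 :: x4 :: x5 :: x6 :: rest := by
    match s, hpre with
    | x0 :: x1 :: x2 :: x3 :: x4 :: x5 :: x6 :: rest, _ =>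
      exact ⟨x0, x1, x2, x3, x4, x5, x6, rest, rfl⟩
  show classify_variant _ = classify_variant_alt _
  simp only [classify_variant, classify_variant_alt, pvGet]
  simp only [show PySem.List.pyRange 1 7 1 = [1,2,3,4,5,6] from by decide,
    show PySem.List.pyRange 0 7 1 = [0,1,2,3,4,5,6] from by decide]
  norm_num [PySem.List.pyGet?_of_nonneg, PySem.List.min?_id_cons,
    List.all, List.filter, List.foldl, List.count_cons,
    show Int.toNat 2 = 2 from rfl, show Int.toNat 3 = 3 from rfl,
    show Int.toNat 4 = 4 from rfl, show Int.toNat 5 = 5 from rfl, show Int.toNat 6 = 6 from rfl,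
    show ∀ (a b c d e f g : Int) (r : List Int), (a::b::c::d::e::f::g::r)[2]? = some c from fun _ _ _ _ _ _ _ _ => rfl,
    show ∀ (a b c d e f g : Int) (r : List Int), (a::b::c::d::e::f::g::r)[3]? = some d from fun _ _ _ _ _ _ _ _ => rfl,
    show ∀ (a b c d e f g : Int) (r : List Int), (a::b::c::d::e::f::g::r)[4]? = some e from fun _ _ _ _ _ _ _ _ => rfl,
    show ∀ (a b c d e f g : Int) (r : List Int), (a::b::c::d::e::f::g::r)[5]? = some f from fun _ _ _ _ _ _ _ _ => rfl,
    show ∀ (a b c d e f g : Int) (r : List Int), (a::b::c::d::e::f::g::r)[6]? = some g from fun _ _ _ _ _ _ _ _ => rfl,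
    show ∀ (a b c d e f g : Int), ([a,b,c,d,e,f,g] : List Int)[4] = e from fun _ _ _ _ _ _ _ => rfl,
    show ∀ (a b c d e f g : Int), PySem.List.slice [a,b,c,d,e,f,g] (some 1) (some 4) = [b,c,d] from fun _ _ _ _ _ _ _ => rfl,
    show ∀ (a b c d e f g : Int), PySem.List.slice [a,b,c,d,e,f,g] (some 5) (some 7) = [f,g] from fun _ _ _ _ _ _ _ => rfl]
  set M := min x0 (min x1 (min x2 (min x3 (min x4 (min x5 x6))))) with hM
  obtain ⟨h1, h2, h3⟩ := pv_count_iffs x0 x1 x2 x3 x4 x5 x6 M hM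
  simp only [h1, h2, h3]
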